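-- pv_equiv track=rewrite | github.com/GerryDoesStuff/YamImageProcessor | yam_processor/data/image_io.py | _iter_tile_boxes
-- ===== SOURCE A (Python) =====
-- from typing import Any, Dict, Iterator, Mapping, MutableMapping, Optional, Tuple
--
-- def _iter_tile_boxes(
--     width: int, height: int, tile_size: Tuple[int, int] | None
-- ) -> Iterator[Tuple[int, int, int, int]]:
--     """Yield bounding boxes that cover an image using strides."""
--
--     if tile_size is None:
--         step_x, step_y = width, height
--     else:
--         step_x, step_y = tile_size
--         if step_x <= 0 or step_y <= 0:
--             raise ValueError("Tile dimensions must be positive integers")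
--     for top in range(0, height, step_y):
--         bottom = min(top + step_y, height)
--         for left in range(0, width, step_x):
--             right = min(left + step_x, width)
--             yield (left, top, right, bottom)
-- ===== SOURCE B (Python) =====
-- from typing import Iterator, Tuple
--
--
-- def _iter_tile_boxes(
--     width: int, height: int, tile_size: Tuple[int, int] | None
-- ) -> Iterator[Tuple[int, int, int, int]]:
--     """Yield tile boxes by a single flat loop over box indices: count the rows
--     and columns with ceiling division, then recover (row, col) from the flat
--     index k with divmod and compute each box's corners arithmetically."""
--
--     if tile_size is None:
--         step_x, step_y = width, height
--     else:
--         step_x, step_y = tile_size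
--         if step_x <= 0 or step_y <= 0:
--             raise ValueError("Tile dimensions must be positive integers")
--     n_rows = max(0, -((-height) // step_y))
--     n_cols = max(0, -((-width) // step_x))
--     for k in range(n_rows * n_cols):
--         row, col = divmod(k, n_cols)
--         top = row * step_y
--         left = col * step_x
--         yield (left, top, min(left + step_x, width), min(top + step_y, height))
-- ===== Notes on version B (the rewrite author's own statement) =====
-- stated objective: alternative
-- what changed: B replaces A's nested strided range loops with one flat loop: it counts rows and columns by ceiling division and recovers each box's (row, col) from the flat index with divmod.
-- outside the precondition, e.g. on _iter_tile_boxes(4, 4, (0, 2)): A raises ValueError, B raises ValueError; on _iter_tile_boxes(0, 3, None): A raises ValueError, B raises ZeroDivisionError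
import Mathlib
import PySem

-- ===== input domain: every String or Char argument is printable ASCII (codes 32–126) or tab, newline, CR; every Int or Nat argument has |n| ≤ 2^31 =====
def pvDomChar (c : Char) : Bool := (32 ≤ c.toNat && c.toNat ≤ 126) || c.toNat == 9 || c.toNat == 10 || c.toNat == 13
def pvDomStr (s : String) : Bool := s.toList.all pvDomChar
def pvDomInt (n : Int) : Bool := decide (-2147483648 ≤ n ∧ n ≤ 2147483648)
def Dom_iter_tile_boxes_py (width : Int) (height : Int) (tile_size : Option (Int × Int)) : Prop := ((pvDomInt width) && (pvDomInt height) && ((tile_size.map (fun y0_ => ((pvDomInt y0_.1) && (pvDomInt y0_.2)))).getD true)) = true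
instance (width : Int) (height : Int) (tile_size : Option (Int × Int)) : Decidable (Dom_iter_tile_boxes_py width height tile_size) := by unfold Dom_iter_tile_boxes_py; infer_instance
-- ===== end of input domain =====

-- B replaces A's nested strided loops by one flat loop over box indices: it counts
-- rows/columns by ceiling division and recovers each box from the flat index with
-- divmod (objective: alternative).


-- ===== PORT A =====
-- Literal port of A: nested range loops with inline clamping, appending one box at a time.
def iter_tile_boxes_py (width : Int) (height : Int) (tile_size : Option (Int × Int)) : List (Int × Int × Int × Int) :=
  let sxy : Int × Int :=
    match tile_size with
    | none => (width, height)
    | some ts => ts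
  let step_x := sxy.1
  let step_y := sxy.2
  (PySem.List.pyRange 0 height step_y).foldl (fun acc top =>
    let bottom := min (top + step_y) height
    (PySem.List.pyRange 0 width step_x).foldl (fun acc2 left =>
      let right := min (left + step_x) width
      acc2 ++ [(left, top, right, bottom)]) acc) []

-- ===== PORT B =====
-- Port of B: count rows/columns by ceiling division, then one flat loop over box
-- indices, recovering (row, col) from the flat index with divmod.
def iter_tile_boxes_py_alt (width : Int) (height : Int) (tile_size : Option (Int × Int)) : List (Int × Int × Int × Int) :=
  let sxy : Int × Int :=
    match tile_size with
    | none => (width, height)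
    | some ts => ts
  let step_x := sxy.1
  let step_y := sxy.2
  let n_rows := max 0 (-(PySem.Int.floordiv (-height) step_y))
  let n_cols := max 0 (-(PySem.Int.floordiv (-width) step_x))
  (PySem.List.pyRange 0 (n_rows * n_cols) 1).map (fun k =>
    let row := PySem.Int.floordiv k n_cols
    let col := PySem.Int.mod k n_cols
    let top := row * step_y
    let left := col * step_x
    (left, top, min (left + step_x) width, min (top + step_y) height))

-- ===== PRECONDITION & SPEC =====
-- Pre_ excludes exactly the inputs on which A raises: an explicit ValueError for a
-- nonpositive tile dimension, and range()'s ValueError for a zero step when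
-- tile_size is None and width or height is 0.
def Pre_iter_tile_boxes_py (width : Int) (height : Int) (tile_size : Option (Int × Int)) : Prop :=
  (tile_size.map (fun ts => decide (0 < ts.1 ∧ 0 < ts.2))).getD (decide (width ≠ 0 ∧ height ≠ 0)) = true
instance (width : Int) (height : Int) (tile_size : Option (Int × Int)) : Decidable (Pre_iter_tile_boxes_py width height tile_size) := by unfold Pre_iter_tile_boxes_py; infer_instance
def pvWitness_iter_tile_boxes_py : Int × Int × (Option (Int × Int)) := (5, 4, some (2, 3))
def Spec_iter_tile_boxes_py (width : Int) (height : Int) (tile_size : Option (Int × Int)) (out : List (Int × Int × Int × Int)) : Prop := out = iter_tile_boxes_py_alt width height tile_size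
instance (width : Int) (height : Int) (tile_size : Option (Int × Int)) (out : List (Int × Int × Int × Int)) : Decidable (Spec_iter_tile_boxes_py width height tile_size out) := by unfold Spec_iter_tile_boxes_py; infer_instance

-- ===== CLAIM (what is proved, stated in full; the proofs are below) =====
def Claim_equal_iter_tile_boxes_py : Prop := ∀ (width : Int) (height : Int) (tile_size : Option (Int × Int)), Dom_iter_tile_boxes_py width height tile_size → Pre_iter_tile_boxes_py width height tile_size → Spec_iter_tile_boxes_py width height tile_size (iter_tile_boxes_py width height tile_size)

-- ===== LEMMAS AND PROOFS =====

-- max 0 (ceiling of b/s, via Python floor division) equals pyRange's count expression.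
theorem pv_ceil_count (b s : Int) (hs : 0 < s) :
    max 0 (-(PySem.Int.floordiv (-b) s)) = if 0 < b then (b + s - 1) / s else 0 := by
  obtain ⟨h1, h2⟩ := (PySem.Int.neg_floordiv_neg_eq_iff_of_pos hs
      (a := b) (q := -(PySem.Int.floordiv (-b) s))).mp rfl
  set q : Int := -(PySem.Int.floordiv (-b) s) with hqdef
  by_cases hb : 0 < b
  · have hq0 : 0 < q := by
      by_contra hq
      push Not at hq
      have : q * s ≤ 0 := mul_nonpos_iff.mpr (Or.inr ⟨hq, le_of_lt hs⟩)
      linarith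
    have hle : q ≤ (b + s - 1) / s := (Int.le_ediv_iff_mul_le hs).mpr (by nlinarith)
    have hlt : (b + s - 1) / s < q + 1 := (Int.ediv_lt_iff_lt_mul hs).mpr (by nlinarith)
    simp [hb]
    omega
  · push Not at hb
    have hq : q ≤ 0 := by
      by_contra hq
      push Not at hq
      have : 0 ≤ (q - 1) * s := mul_nonneg (by omega) (le_of_lt hs)
      linarith
    rw [if_neg (by omega)]
    omega

-- pyRange from 0 with nonzero step, expressed through B's ceiling count.
theorem pv_pyRange_step (b s : Int) (hs : s ≠ 0) :
    PySem.List.pyRange 0 b s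
      = (List.range (max 0 (-(PySem.Int.floordiv (-b) s))).toNat).map (fun k : Nat => s * (k : Int)) := by
  rcases lt_or_gt_of_ne hs with hneg | hpos
  · have hfd : PySem.Int.floordiv (-b) s = PySem.Int.floordiv b (-s) := by
      have h := PySem.Int.floordiv_neg_neg b (-s)
      simpa using h
    have h := pv_ceil_count (-b) (-s) (by omega)
    rw [neg_neg] at h
    rw [hfd, h]
    simp only [PySem.List.pyRange, if_neg hs, if_neg (not_lt.mpr hneg.le), zero_sub, zero_add]
    by_cases hb : b < 0
    · simp [hb]
    · simp [hb]
  · rw [pv_ceil_count b s hpos]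
    simp only [PySem.List.pyRange, if_neg hs, if_pos hpos, sub_zero, zero_add]
    by_cases hb : 0 < b
    · simp [hb]
    · simp [hb]

-- flat index loop over R*C with divmod equals the nested loop over rows then columns (Nat form).
theorem pv_range_mul_flat {α : Type} (f : Nat → Nat → α) (R C : Nat) :
    (List.range (R * C)).map (fun k => f (k / C) (k % C))
      = (List.range R).flatMap (fun r => (List.range C).map (fun c => f r c)) := by
  induction R with
  | zero => simp
  | succ R ih =>
    rcases Nat.eq_zero_or_pos C with hC | hC
    · simp [hC]
    · have hmul : (R + 1) * C = R * C + C := by ring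
      rw [hmul, List.range_add, List.map_append, ih, List.range_succ, List.flatMap_append,
        List.map_map]
      congr 1
      simp only [List.flatMap_cons, List.flatMap_nil, List.append_nil]
      refine List.map_congr_left (fun c hc => ?_)
      have hcC : c < C := List.mem_range.mp hc
      have h1 : (R * C + c) / C = R := by
        rw [Nat.mul_comm, Nat.mul_add_div hC, Nat.div_eq_of_lt hcC, Nat.add_zero]
      have h2 : (R * C + c) % C = c := by
        rw [Nat.mul_comm, Nat.mul_add_mod, Nat.mod_eq_of_lt hcC]
      simp [Function.comp, h1, h2]

-- core equality for nonzero steps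
theorem pv_core (w h sx sy : Int) (hsx : sx ≠ 0) (hsy : sy ≠ 0) :
    (PySem.List.pyRange 0 h sy).foldl (fun acc top =>
      let bottom := min (top + sy) h
      (PySem.List.pyRange 0 w sx).foldl (fun acc2 left =>
        let right := min (left + sx) w
        acc2 ++ [(left, top, right, bottom)]) acc) ([] : List (Int × Int × Int × Int))
    = (PySem.List.pyRange 0 (max 0 (-(PySem.Int.floordiv (-h) sy)) * max 0 (-(PySem.Int.floordiv (-w) sx))) 1).map (fun k =>
        let row := PySem.Int.floordiv k (max 0 (-(PySem.Int.floordiv (-w) sx)))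
        let col := PySem.Int.mod k (max 0 (-(PySem.Int.floordiv (-w) sx)))
        let top := row * sy
        let left := col * sx
        (left, top, min (left + sx) w, min (top + sy) h)) := by
  obtain ⟨Rn, hRn⟩ : ∃ n : Nat, max 0 (-(PySem.Int.floordiv (-h) sy)) = (n : Int) :=
    ⟨_, (Int.toNat_of_nonneg (le_max_left _ _)).symm⟩
  obtain ⟨Cn, hCn⟩ : ∃ n : Nat, max 0 (-(PySem.Int.floordiv (-w) sx)) = (n : Int) :=
    ⟨_, (Int.toNat_of_nonneg (le_max_left _ _)).symm⟩
  simp only [PySem.List.foldl_append_singleton_eq_map]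
  rw [PySem.List.foldl_append_eq_flatMap, List.nil_append,
    pv_pyRange_step h sy hsy, pv_pyRange_step w sx hsx, hRn, hCn,
    Int.toNat_natCast, Int.toNat_natCast, ← Int.natCast_mul,
    PySem.List.pyRange_zero_nat, List.map_map, List.flatMap_map]
  have hBm : (List.range (Rn * Cn)).map
        ((fun k : Int =>
          (PySem.Int.mod k (Cn : Int) * sx, PySem.Int.floordiv k (Cn : Int) * sy,
            min (PySem.Int.mod k (Cn : Int) * sx + sx) w,
            min (PySem.Int.floordiv k (Cn : Int) * sy + sy) h)) ∘
          (fun k : Nat => (k : Int)))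
      = (List.range (Rn * Cn)).map (fun k : Nat =>
          (((k % Cn : Nat) : Int) * sx, ((k / Cn : Nat) : Int) * sy,
            min (((k % Cn : Nat) : Int) * sx + sx) w,
            min (((k / Cn : Nat) : Int) * sy + sy) h)) := by
    refine List.map_congr_left (fun k _ => ?_)
    simp [Function.comp]
  rw [hBm, pv_range_mul_flat
    (fun r c => (((c : Nat) : Int) * sx, ((r : Nat) : Int) * sy,
      min (((c : Nat) : Int) * sx + sx) w, min (((r : Nat) : Int) * sy + sy) h)) Rn Cn]
  exact congrArg (fun g => List.flatMap g (List.range Rn)) (funext fun r => by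
    rw [List.map_map]
    exact List.map_congr_left (fun c _ => by simp [Function.comp, Int.mul_comm]))

-- ===== VERDICT (by name: the statement is the Claim_ definition above) =====
theorem iter_tile_boxes_py_spec : Claim_equal_iter_tile_boxes_py := by
  intro width height tile_size _ hpre
  unfold Spec_iter_tile_boxes_py iter_tile_boxes_py iter_tile_boxes_py_alt
  cases tile_size with
  | none =>
    simp only [Pre_iter_tile_boxes_py, Option.map_none, Option.getD_none, decide_eq_true_eq] at hpre
    exact pv_core width height width height hpre.1 hpre.2
  | some ts =>
    simp only [Pre_iter_tile_boxes_py, Option.map_some, Option.getD_some, decide_eq_true_eq] at hpre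
    exact pv_core width height ts.1 ts.2 (by omega) (by omega)
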